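-- pv_equiv track=rewrite | github.com/ozgurk12/teknik_destek | backend/app/services/aylik_plan_ai_service.py | _parse_sosyal_duygusal
-- ===== SOURCE A (Python) =====
-- from typing import List, Dict, Any, Optional
--
-- def _parse_sosyal_duygusal(content: str) -> Dict[str, List[str]]:
--     """Sosyal-duygusal becerileri parse eder"""
--     result = {}
--     current_skill = None
--
--     for line in content.split("\n"):
--         if "###" in line or line.startswith("SDB"):
--             skill = line.replace("###", "").strip()
--             current_skill = skill
--             result[current_skill] = []
--         elif current_skill and line.strip() and not line.startswith("#"):
--             result[current_skill].append(line.strip())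
--
--     return result
-- ===== SOURCE B (Python) =====
-- def _is_header(line):
--     return "###" in line or line.startswith("SDB")
--
--
-- def _split_section(rest):
--     """Splits off the body lines before the next header; returns (body, remainder)."""
--     body = []
--     while rest and not _is_header(rest[0]):
--         body.append(rest[0])
--         rest = rest[1:]
--     return body, rest
--
--
-- def _parse_sosyal_duygusal(content):
--     """Sosyal-duygusal becerileri parse eder"""
--     rest = content.split("\n")
--     while rest and not _is_header(rest[0]):
--         rest = rest[1:]
--     result = {}
--     while rest:
--         name = rest[0].replace("###", "").strip()
--         body, rest = _split_section(rest[1:])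
--         result[name] = [l.strip() for l in body if l.strip() and not l.startswith("#")]
--     return result
-- ===== Notes on version B (the rewrite author's own statement) =====
-- stated objective: alternative
-- what changed: Replaces the carry-current_skill state machine (one fold mutating the dict line by line) with a section-splitting decomposition: skip the pre-header preamble, then repeatedly take a header line and split off its whole body block, assigning each section's filtered body at once.
-- intended difference: On contents whose last header line has an empty stripped name (a header marker surrounded only by whitespace) and is followed, before the next header, by body lines that survive the filter, A returns an empty list for the empty-string key because the empty current_skill string is falsy and disables its accumulation branch, while B returns those stripped body lines, the intended section body. — e.g. on _parse_sosyal_duygusal("###\na"): A returns [("", [])], B returns [("", ["a"])]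
import Mathlib
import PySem

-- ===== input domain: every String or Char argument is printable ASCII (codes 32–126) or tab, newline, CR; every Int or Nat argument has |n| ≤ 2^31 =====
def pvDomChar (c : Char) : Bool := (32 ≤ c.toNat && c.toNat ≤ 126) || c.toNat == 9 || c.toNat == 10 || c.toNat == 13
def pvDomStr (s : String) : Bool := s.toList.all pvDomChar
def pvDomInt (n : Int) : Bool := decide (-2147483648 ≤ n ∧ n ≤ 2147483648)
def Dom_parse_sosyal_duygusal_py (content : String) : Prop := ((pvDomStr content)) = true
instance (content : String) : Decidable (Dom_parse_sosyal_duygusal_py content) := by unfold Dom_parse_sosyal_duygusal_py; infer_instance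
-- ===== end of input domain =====

-- B replaces A's carry-current_skill state machine by a section-splitting pass: skip the
-- preamble, then repeatedly take a header line and split off its whole body block (objective: alternative).
-- On the D_ inputs below, A's falsy-empty-string test drops the body of an empty-named header; B keeps it.

-- ===== PORT A =====
-- the for-loop over content.split("\n") with state (result, current_skill), as structural recursion
def pvAGo (d : PySem.Dict String (List String)) (cur : Option String) :
    List String → PySem.Dict String (List String)
  | [] => d
  | line :: rest =>
    if PySem.Str.isIn "###" line || PySem.Str.startswith line "SDB" then
      let skill := PySem.Str.strip (PySem.Str.replace line "###" "")
      pvAGo (d.insert skill []) (some skill) rest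
    else
      match cur with
      | none => pvAGo d none rest
      | some s =>
        if (s != "") && (PySem.Str.strip line != "") && !(PySem.Str.startswith line "#") then
          pvAGo (d.modify s [] (· ++ [PySem.Str.strip line])) (some s) rest
        else
          pvAGo d (some s) rest

def parse_sosyal_duygusal_py (content : String) : List (String × List String) :=
  (pvAGo PySem.Dict.empty none ((PySem.Str.split? content "\n").getD [])).items

-- ===== PORT B =====
def pvIsHeader (line : String) : Bool :=
  PySem.Str.isIn "###" line || PySem.Str.startswith line "SDB"

-- _split_section: body lines before the next header, plus the remainder
def pvSplitSection : List String → List String × List String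
  | [] => ([], [])
  | l :: rest =>
    if pvIsHeader l then ([], l :: rest)
    else
      let p := pvSplitSection rest
      (l :: p.1, p.2)

-- the preamble-dropping while loop
def pvSkipPre : List String → List String
  | [] => []
  | l :: rest => if pvIsHeader l then l :: rest else pvSkipPre rest

theorem pvSplitSection_snd_length_le (ls : List String) :
    (pvSplitSection ls).2.length ≤ ls.length := by
  induction ls with
  | nil => simp [pvSplitSection]
  | cons l rest ih =>
    simp only [pvSplitSection]
    split
    · simp
    · simpa using Nat.le_succ_of_le ih

def pvFiltBody (body : List String) : List String :=
  (body.filter (fun l => (PySem.Str.strip l != "") && !(PySem.Str.startswith l "#"))).map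
    PySem.Str.strip

-- the main while loop: rest[0] is the header of the next section
def pvSectionsGo (d : PySem.Dict String (List String)) :
    List String → PySem.Dict String (List String)
  | [] => d
  | line :: rest =>
    let name := PySem.Str.strip (PySem.Str.replace line "###" "")
    let p := pvSplitSection rest
    pvSectionsGo (d.insert name (pvFiltBody p.1)) p.2
  termination_by ls => ls.length
  decreasing_by
    exact Nat.lt_succ_of_le (pvSplitSection_snd_length_le rest)

def parse_sosyal_duygusal_py_alt (content : String) : List (String × List String) :=
  (pvSectionsGo PySem.Dict.empty (pvSkipPre ((PySem.Str.split? content "\n").getD []))).items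

-- ===== PRECONDITION & SPEC =====
-- On contents whose LAST header line has an empty stripped name (a header marker surrounded only
-- by whitespace) and is followed, before the next header, by body lines that survive the filter,
-- A returns [] for the empty-string key (the empty current_skill string is falsy, disabling its
-- accumulation branch) while B returns those stripped body lines, the intended section body.
-- D_: the last empty-named header line exists and the lines after it, up to the next header,
-- contain a non-blank line that is not a comment line.
def pvHd (l : List Char) : Bool :=
  PySem.Chars.isIn "###".toList l || "SDB".toList.isPrefixOf l
def pvE (l : List Char) : Bool :=
  pvHd l && (PySem.Chars.replace l "###".toList []).all PySem.Chars.isspace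
def pvKp (l : List Char) : Bool :=
  !l.all PySem.Chars.isspace && l.head? != some '#'

def D_parse_sosyal_duygusal_py (content : String) : Prop :=
  let L := PySem.Chars.splitOn content.toList "\n".toList
  L.any pvE ∧ ((L.reverse.takeWhile (!pvE ·)).reverse.takeWhile (!pvHd ·)).any pvKp
instance (content : String) : Decidable (D_parse_sosyal_duygusal_py content) := by
  unfold D_parse_sosyal_duygusal_py; infer_instance

def Spec_parse_sosyal_duygusal_py (content : String) (out : List (String × List String)) : Prop :=
  ¬ D_parse_sosyal_duygusal_py content → out = parse_sosyal_duygusal_py_alt content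
instance (content : String) (out : List (String × List String)) : Decidable (Spec_parse_sosyal_duygusal_py content out) := by
  unfold Spec_parse_sosyal_duygusal_py; infer_instance

def pvDiffWitness_parse_sosyal_duygusal_py : String := "###\na"
def pvDiffWitnessOut_parse_sosyal_duygusal_py :
    (List (String × List String)) × (List (String × List String)) :=
  ([("", [])], [("", ["a"])])

-- ===== CLAIM (what is proved, stated in full; the proofs are below) =====
def Claim_unchanged_parse_sosyal_duygusal_py : Prop := ∀ (content : String), Dom_parse_sosyal_duygusal_py content → Spec_parse_sosyal_duygusal_py content (parse_sosyal_duygusal_py content)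
def Claim_changed_parse_sosyal_duygusal_py : Prop := Dom_parse_sosyal_duygusal_py (pvDiffWitness_parse_sosyal_duygusal_py) ∧ D_parse_sosyal_duygusal_py (pvDiffWitness_parse_sosyal_duygusal_py) ∧ parse_sosyal_duygusal_py (pvDiffWitness_parse_sosyal_duygusal_py) = pvDiffWitnessOut_parse_sosyal_duygusal_py.1 ∧ parse_sosyal_duygusal_py_alt (pvDiffWitness_parse_sosyal_duygusal_py) = pvDiffWitnessOut_parse_sosyal_duygusal_py.2 ∧ pvDiffWitnessOut_parse_sosyal_duygusal_py.1 ≠ pvDiffWitnessOut_parse_sosyal_duygusal_py.2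
def Claim_exact_parse_sosyal_duygusal_py : Prop := ∀ (content : String), Dom_parse_sosyal_duygusal_py content → D_parse_sosyal_duygusal_py content → parse_sosyal_duygusal_py content ≠ parse_sosyal_duygusal_py_alt content

-- ===== LEMMAS AND PROOFS =====

-- a "boundary" list: empty, or starting at a header line
def pvBoundary (ls : List String) : Prop :=
  ls = [] ∨ ∃ h r, ls = h :: r ∧ pvIsHeader h = true

-- the D_ scan (proof-side): state live = the last header seen had an empty name,
-- ans = that header is followed by a surviving body line
def pvDGo (live ans : Bool) : List String → Bool
  | [] => ans
  | l :: r =>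
    if pvE l.toList then pvDGo true false r
    else if pvHd l.toList then pvDGo false ans r
    else if live && pvKp l.toList then pvDGo true true r
    else pvDGo live ans r

-- the candidate body block of the last empty-named header
def pvBig (ls : List String) : Bool :=
  ((ls.reverse.takeWhile (fun l => !pvE l.toList)).reverse.takeWhile
    (fun l => !pvHd l.toList)).any (fun l => pvKp l.toList)

-- bridges between the D_ condition's input-shape tests and the ports' string primitives
theorem pvHd_eq (l : String) : pvHd l.toList = pvIsHeader l := by
  rw [Bool.eq_iff_iff]
  simp [pvHd, pvIsHeader, PySem.Chars.isIn_iff_infix, PySem.Chars.startswith_iff,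
    List.isPrefixOf_iff_prefix]

theorem pvStrEmpty (s : String) : s = "" ↔ s.toList = [] := by
  constructor
  · intro h; rw [h]; rfl
  · intro h; rw [← String.ofList_toList (s := s), h]

theorem pvStripEmpty (cs : List Char) :
    PySem.Chars.strip cs = [] ↔ ∀ c ∈ cs, PySem.Chars.isspace c = true := by
  unfold PySem.Chars.strip PySem.Chars.rstrip PySem.Chars.lstrip
  simp only [List.reverse_eq_nil_iff, List.dropWhile_eq_nil_iff, List.mem_reverse]
  constructor
  · intro hd c hc
    rw [← List.takeWhile_append_dropWhile (p := PySem.Chars.isspace) (l := cs)] at hc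
    rcases List.mem_append.mp hc with h | h
    · exact List.mem_takeWhile_imp h
    · exact hd c h
  · intro ha c hc
    exact ha c ((List.dropWhile_sublist _).mem hc)

theorem pvStripNe (l : String) :
    (PySem.Str.strip l != "") = l.toList.any (fun c => !PySem.Chars.isspace c) := by
  rw [Bool.eq_iff_iff]
  have h2 : PySem.Str.strip l = "" ↔ PySem.Chars.strip l.toList = [] := by
    rw [pvStrEmpty, PySem.Str.toList_strip]
  simp [bne_iff_ne, h2, pvStripEmpty]

theorem pvNameEmpty_iff (l : String) :
    ((PySem.Chars.replace l.toList "###".toList []).all PySem.Chars.isspace = true) ↔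
      PySem.Str.strip (PySem.Str.replace l "###" "") = "" := by
  rw [pvStrEmpty, PySem.Str.toList_strip, PySem.Str.toList_replace]
  rw [show ("" : String).toList = [] from rfl]
  rw [pvStripEmpty]
  simp [List.all_eq_true]

theorem pvHashPrefix (xs : List Char) : (['#'] <+: xs) ↔ xs.head? = some '#' := by
  cases xs with
  | nil => simp
  | cons c cs => simp [List.cons_prefix_cons, eq_comm]

theorem pvStartsHash (l : String) :
    PySem.Str.startswith l "#" = (l.toList.head? == some '#') := by
  rw [Bool.eq_iff_iff, PySem.Str.startswith_eq]
  rw [show ("#" : String).toList = ['#'] from rfl]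
  rw [PySem.Chars.startswith_iff, pvHashPrefix]
  simp

theorem pvAnyNotAll (cs : List Char) :
    cs.any (fun c => !PySem.Chars.isspace c) = !cs.all PySem.Chars.isspace := by
  induction cs with
  | nil => rfl
  | cons c cs ih => simp [ih, Bool.or_comm]

theorem pvKp_eq (l : String) :
    ((PySem.Str.strip l != "") && !(PySem.Str.startswith l "#")) = pvKp l.toList := by
  rw [pvStripNe, pvStartsHash, pvAnyNotAll]; rfl

-- takeWhile over an append, by whether the first block trips the predicate
theorem pvTW1 {α : Type} (p : α → Bool) (q s : List α) (h : q.any p = true) :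
    (q ++ s).takeWhile (fun y => !p y) = q.takeWhile (fun y => !p y) := by
  induction q with
  | nil => simp at h
  | cons a q ih =>
    by_cases ha : p a = true
    · simp [ha]
    · have ha' : p a = false := by simpa using ha
      have h' : q.any p = true := by simpa [ha'] using h
      simp [ha', ih h']

theorem pvTW2 {α : Type} (p : α → Bool) (q s : List α) (h : q.any p = false) :
    (q ++ s).takeWhile (fun y => !p y) = q ++ s.takeWhile (fun y => !p y) := by
  induction q with
  | nil => simp
  | cons a q ih =>
    simp only [List.any_cons, Bool.or_eq_false_iff] at h
    simp [h.1, ih h.2]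

theorem pvBigAny (l : String) (r : List String)
    (hr : r.any (fun x => pvE x.toList) = true) : pvBig (l :: r) = pvBig r := by
  unfold pvBig
  rw [List.reverse_cons, pvTW1 _ _ _ (by simpa using hr)]

theorem pvBigLast (l : String) (r : List String) (hE : pvE l.toList = true)
    (hr : r.any (fun x => pvE x.toList) = false) :
    pvBig (l :: r) =
      (r.takeWhile (fun x => !pvHd x.toList)).any (fun x => pvKp x.toList) := by
  unfold pvBig
  rw [List.reverse_cons, pvTW2 _ _ _ (by simpa using hr)]
  rw [show List.takeWhile (fun y => !pvE y.toList) [l] = [] from by simp [hE]]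
  simp

-- the scan, characterised by the declarative D_ shape
theorem pvScan (ls : List String) :
    (∀ live ans, ls.any (fun x => pvE x.toList) = true → pvDGo live ans ls = pvBig ls) ∧
    (∀ ans, ls.any (fun x => pvE x.toList) = false →
      pvDGo true ans ls =
        (ans || (ls.takeWhile (fun x => !pvHd x.toList)).any (fun x => pvKp x.toList))) ∧
    (∀ ans, ls.any (fun x => pvE x.toList) = false → pvDGo false ans ls = ans) := by
  induction ls with
  | nil =>
    refine ⟨fun _ _ h => by simp at h, fun ans _ => by simp [pvDGo], fun ans _ => rfl⟩
  | cons l r ih =>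
    obtain ⟨ih1, ih2, ih3⟩ := ih
    refine ⟨?_, ?_, ?_⟩
    · intro live ans hany
      by_cases hE : pvE l.toList = true
      · rw [pvDGo, if_pos hE]
        by_cases hr : r.any (fun x => pvE x.toList) = true
        · rw [ih1 true false hr, pvBigAny l r hr]
        · have hr' : r.any (fun x => pvE x.toList) = false := by simpa using hr
          rw [ih2 false hr', pvBigLast l r hE hr']
          simp
      · have hE' : pvE l.toList = false := by simpa using hE
        have hr : r.any (fun x => pvE x.toList) = true := by
          simpa [hE'] using hany
        rw [pvBigAny l r hr]
        by_cases hH : pvHd l.toList = true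
        · rw [pvDGo, if_neg (by simp [hE']), if_pos hH, ih1 false ans hr]
        · by_cases hlk : (live && pvKp l.toList) = true
          · rw [pvDGo, if_neg (by simp [hE']), if_neg hH, if_pos hlk, ih1 true true hr]
          · rw [pvDGo, if_neg (by simp [hE']), if_neg hH, if_neg hlk, ih1 live ans hr]
    · intro ans hanyf
      simp only [List.any_cons, Bool.or_eq_false_iff] at hanyf
      obtain ⟨hEf, hrf⟩ := hanyf
      by_cases hH : pvHd l.toList = true
      · rw [pvDGo, if_neg (by simp [hEf]), if_pos hH, ih3 ans hrf]
        simp [hH]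
      · have hH' : pvHd l.toList = false := by simpa using hH
        by_cases hK : pvKp l.toList = true
        · rw [pvDGo, if_neg (by simp [hEf]), if_neg hH, if_pos (by simp [hK]),
            ih2 true hrf]
          simp [hH', hK]
        · have hK' : pvKp l.toList = false := by simpa using hK
          rw [pvDGo, if_neg (by simp [hEf]), if_neg hH, if_neg (by simp [hK']),
            ih2 ans hrf]
          simp [hH', hK']
    · intro ans hanyf
      simp only [List.any_cons, Bool.or_eq_false_iff] at hanyf
      obtain ⟨hEf, hrf⟩ := hanyf
      by_cases hH : pvHd l.toList = true
      · rw [pvDGo, if_neg (by simp [hEf]), if_pos hH, ih3 ans hrf]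
      · rw [pvDGo, if_neg (by simp [hEf]), if_neg hH,
          if_neg (by simp), ih3 ans hrf]

theorem pvLines_eq (content : String) :
    (PySem.Str.split? content "\n").getD [] =
      (PySem.Chars.splitOn content.toList "\n".toList).map String.ofList := by
  simp [PySem.Str.split?, PySem.Chars.split?]

-- D_ says exactly that the scan answers true on the split lines
theorem pvD_iff (content : String) :
    D_parse_sosyal_duygusal_py content ↔
      pvDGo false false ((PySem.Str.split? content "\n").getD []) = true := by
  unfold D_parse_sosyal_duygusal_py
  simp only []
  rw [pvLines_eq]
  have hany : ((PySem.Chars.splitOn content.toList "\n".toList).map String.ofList).any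
      (fun x => pvE x.toList) =
      (PySem.Chars.splitOn content.toList "\n".toList).any pvE := by
    simp [List.any_map, Function.comp_def]
  have hbig : pvBig ((PySem.Chars.splitOn content.toList "\n".toList).map String.ofList) =
      (((PySem.Chars.splitOn content.toList "\n".toList).reverse.takeWhile
        (fun l => !pvE l)).reverse.takeWhile (fun l => !pvHd l)).any pvKp := by
    unfold pvBig
    rw [← List.map_reverse, List.takeWhile_map, ← List.map_reverse, List.takeWhile_map,
      List.any_map]
    simp [Function.comp_def]
  cases h : (PySem.Chars.splitOn content.toList "\n".toList).any pvE
  · rw [(pvScan _).2.2 false (by rw [hany, h])]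
    simp
  · rw [(pvScan _).1 false false (by rw [hany, h]), hbig]
    simp

theorem pvSkipPre_boundary (ls : List String) : pvBoundary (pvSkipPre ls) := by
  induction ls with
  | nil => exact Or.inl rfl
  | cons l rest ih =>
    by_cases hh : pvIsHeader l = true
    · exact Or.inr ⟨l, rest, by simp [pvSkipPre, hh], hh⟩
    · simpa [pvSkipPre, hh] using ih

theorem pvSplit_snd_boundary (ls : List String) : pvBoundary (pvSplitSection ls).2 := by
  induction ls with
  | nil => exact Or.inl rfl
  | cons l rest ih =>
    by_cases hh : pvIsHeader l = true
    · exact Or.inr ⟨l, rest, by simp [pvSplitSection, hh], hh⟩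
    · simpa [pvSplitSection, hh] using ih

-- A's loop ignores cur at a boundary
theorem pvAGo_boundary_cur (ls : List String) (hb : pvBoundary ls)
    (d : PySem.Dict String (List String)) (c c' : Option String) :
    pvAGo d c ls = pvAGo d c' ls := by
  rcases hb with h0 | ⟨h, r, hlr, hh⟩
  · subst h0; rfl
  · subst hlr
    have hh' : (PySem.Str.isIn "###" h || PySem.Str.startswith h "SDB") = true := hh
    rw [pvAGo.eq_def]
    conv_rhs => rw [pvAGo.eq_def]
    simp only [hh', if_true]

-- A's loop consumes a whole section body when the current skill name is nonempty
theorem pvAGo_sec (s : String) (hs : s ≠ "") (rest : List String) :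
    ∀ (d : PySem.Dict String (List String)) (acc : List String),
    pvAGo (d.insert s acc) (some s) rest =
      pvAGo (d.insert s (acc ++ pvFiltBody (pvSplitSection rest).1)) (some s)
        (pvSplitSection rest).2 := by
  induction rest with
  | nil => intro d acc; simp [pvSplitSection, pvFiltBody, List.append_nil]
  | cons l r ih =>
    intro d acc
    by_cases hh : pvIsHeader l = true
    · have hsplit : pvSplitSection (l :: r) = ([], l :: r) := by simp [pvSplitSection, hh]
      rw [hsplit]
      simp [pvFiltBody, List.append_nil]
    · have hh' : ¬ (PySem.Str.isIn "###" l || PySem.Str.startswith l "SDB") = true := hh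
      have hsplit : pvSplitSection (l :: r) =
          (l :: (pvSplitSection r).1, (pvSplitSection r).2) := by
        simp [pvSplitSection, hh]
      rw [pvAGo, if_neg hh', hsplit]
      have hsb : (s != "") = true := by simpa using hs
      by_cases hcond : ((s != "") && (PySem.Str.strip l != "") && !(PySem.Str.startswith l "#")) = true
      · rw [if_pos hcond]
        have hmod : (d.insert s acc).modify s [] (· ++ [PySem.Str.strip l]) =
            d.insert s (acc ++ [PySem.Str.strip l]) := by
          show ((d.insert s acc).insert s
              (((d.insert s acc).getD s []) ++ [PySem.Str.strip l])) = _
          rw [PySem.Dict.getD_insert_self, PySem.Dict.insert_insert_self]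
        rw [hmod, ih d (acc ++ [PySem.Str.strip l])]
        simp only [Bool.and_eq_true] at hcond
        have hl : ((PySem.Str.strip l != "") && !(PySem.Str.startswith l "#")) = true := by
          simp only [Bool.and_eq_true]; exact ⟨hcond.1.2, hcond.2⟩
        simp only [pvFiltBody, List.filter_cons, hl, if_true, List.map_cons,
          List.append_assoc, List.singleton_append]
      · rw [if_neg hcond]
        rw [ih d acc]
        have hl : ((PySem.Str.strip l != "") && !(PySem.Str.startswith l "#")) = false := by
          cases hb : (PySem.Str.strip l != "") <;>
            cases hc : (!(PySem.Str.startswith l "#")) <;> simp_all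
        simp only [pvFiltBody, List.filter_cons, hl, Bool.false_eq_true, if_false]

-- A's loop skips a whole section body when the current skill name is empty
theorem pvAGo_skip_empty (rest : List String) (d : PySem.Dict String (List String)) :
    pvAGo d (some "") rest = pvAGo d (some "") (pvSplitSection rest).2 := by
  induction rest with
  | nil => rfl
  | cons l r ih =>
    by_cases hh : pvIsHeader l = true
    · have hsplit : pvSplitSection (l :: r) = ([], l :: r) := by simp [pvSplitSection, hh]
      rw [hsplit]
    · have hh' : ¬ (PySem.Str.isIn "###" l || PySem.Str.startswith l "SDB") = true := hh
      have hsplit : pvSplitSection (l :: r) =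
          (l :: (pvSplitSection r).1, (pvSplitSection r).2) := by
        simp [pvSplitSection, hh]
      rw [pvAGo, if_neg hh', hsplit]
      simpa using ih

-- the D_ scan over a section body, live = false: no change
theorem pvDGo_sec_false (rest : List String) (ans : Bool) :
    pvDGo false ans rest = pvDGo false ans (pvSplitSection rest).2 := by
  induction rest with
  | nil => rfl
  | cons l r ih =>
    by_cases hh : pvIsHeader l = true
    · have hsplit : pvSplitSection (l :: r) = ([], l :: r) := by simp [pvSplitSection, hh]
      rw [hsplit]
    · have hsplit : pvSplitSection (l :: r) =
          (l :: (pvSplitSection r).1, (pvSplitSection r).2) := by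
        simp [pvSplitSection, hh]
      have hh2 : pvHd l.toList = false := by rw [pvHd_eq]; simpa using hh
      have hE2 : pvE l.toList = false := by simp [pvE, hh2]
      rw [pvDGo, if_neg (by simp [hE2]), if_neg (by simp [hh2]), hsplit]
      simpa using ih

-- the D_ scan over a section body, live = true: ans picks up whether the body survives the filter
theorem pvDGo_sec_true (rest : List String) (ans : Bool) :
    pvDGo true ans rest =
      pvDGo true (ans || !(pvFiltBody (pvSplitSection rest).1).isEmpty)
        (pvSplitSection rest).2 := by
  induction rest generalizing ans with
  | nil => simp [pvSplitSection, pvFiltBody]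
  | cons l r ih =>
    by_cases hh : pvIsHeader l = true
    · have hsplit : pvSplitSection (l :: r) = ([], l :: r) := by simp [pvSplitSection, hh]
      rw [hsplit]
      simp [pvFiltBody]
    · have hsplit : pvSplitSection (l :: r) =
          (l :: (pvSplitSection r).1, (pvSplitSection r).2) := by
        simp [pvSplitSection, hh]
      have hh2 : pvHd l.toList = false := by rw [pvHd_eq]; simpa using hh
      have hE2 : pvE l.toList = false := by simp [pvE, hh2]
      rw [pvDGo, if_neg (by simp [hE2]), if_neg (by simp [hh2]), hsplit]
      by_cases hk : pvKp l.toList = true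
      · have hfc : pvFiltBody (l :: (pvSplitSection r).1) =
            PySem.Str.strip l :: pvFiltBody (pvSplitSection r).1 := by
          simp only [pvFiltBody, List.filter_cons]
          rw [if_pos (by rw [pvKp_eq]; exact hk)]
          rfl
        rw [if_pos (by simp [hk]), hfc, ih true]
        simp
      · have hk' : pvKp l.toList = false := by simpa using hk
        have hfc : pvFiltBody (l :: (pvSplitSection r).1) =
            pvFiltBody (pvSplitSection r).1 := by
          simp only [pvFiltBody, List.filter_cons]
          rw [if_neg (by rw [pvKp_eq, hk']; simp)]
        rw [if_neg (by simp [hk']), hfc]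
        exact ih ans

-- the D_ scan ignores live at a boundary
theorem pvDGo_boundary_live (ls : List String) (hb : pvBoundary ls) (a b ans : Bool) :
    pvDGo a ans ls = pvDGo b ans ls := by
  rcases hb with h0 | ⟨h, r, hlr, hh⟩
  · subst h0; rfl
  · subst hlr
    have hh2 : pvHd h.toList = true := by rw [pvHd_eq]; exact hh
    by_cases hE2 : pvE h.toList = true
    · rw [pvDGo, if_pos hE2, pvDGo, if_pos hE2]
    · rw [pvDGo, if_neg hE2, if_pos hh2, pvDGo, if_neg hE2, if_pos hh2]

-- two dicts with equal ordered key lists and equal lookups are equal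
theorem pvDictEq (d₁ d₂ : PySem.Dict String (List String))
    (hk : d₁.keys = d₂.keys) (hnd : d₁.keys.Nodup)
    (hg : ∀ k, d₁.get? k = d₂.get? k) : d₁ = d₂ := by
  apply PySem.Dict.ext
  rw [PySem.Dict.items_eq_map_keys d₁ hnd [], PySem.Dict.items_eq_map_keys d₂ (hk ▸ hnd) [], hk]
  apply List.map_congr_left
  intro k _
  rw [PySem.Dict.getD_eq_get?_getD, PySem.Dict.getD_eq_get?_getD, hg k]

theorem pvKeysInsertEq (d₁ d₂ : PySem.Dict String (List String))
    (hk : d₁.keys = d₂.keys) (k : String) (v w : List String) :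
    (d₁.insert k v).keys = (d₂.insert k w).keys := by
  by_cases hc : d₁.contains k = true
  · have hc2 : d₂.contains k = true := by
      rw [PySem.Dict.contains_iff_mem_keys] at hc ⊢; rw [← hk]; exact hc
    rw [PySem.Dict.keys_insert_of_contains _ v hc, PySem.Dict.keys_insert_of_contains _ w hc2, hk]
  · have hc1 : d₁.contains k = false := by simpa using hc
    have hc2 : d₂.contains k = false := by
      rw [← Bool.not_eq_true, PySem.Dict.contains_iff_mem_keys, ← hk,
        ← PySem.Dict.contains_iff_mem_keys]
      simp [hc1]
    rw [PySem.Dict.keys_insert_of_not_contains _ v hc1,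
      PySem.Dict.keys_insert_of_not_contains _ w hc2, hk]

-- the base case of pvMain
theorem pvMainNil (d₁ d₂ : PySem.Dict String (List String)) (ans : Bool)
    (hk : d₁.keys = d₂.keys) (hnd : d₁.keys.Nodup)
    (hne : ∀ k, k ≠ "" → d₁.get? k = d₂.get? k)
    (hz1 : ans = false → d₁.get? "" = d₂.get? "")
    (hz2 : ans = true → d₁.get? "" ≠ d₂.get? "") :
    (pvDGo false ans [] = false → pvAGo d₁ none [] = pvSectionsGo d₂ []) ∧
    (pvDGo false ans [] = true →
      (pvAGo d₁ none []).get? "" ≠ (pvSectionsGo d₂ []).get? "") := by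
  have hgo : pvSectionsGo d₂ [] = d₂ := by rw [pvSectionsGo.eq_def]
  constructor
  · intro h0
    have ha : ans = false := h0
    rw [hgo]
    show d₁ = d₂
    apply pvDictEq d₁ d₂ hk hnd
    intro k
    by_cases hke : k = ""
    · subst hke; exact hz1 ha
    · exact hne k hke
  · intro h1
    have ha : ans = true := h1
    rw [hgo]
    exact hz2 ha

-- MAIN: from a boundary, with dicts agreeing except possibly at "", A's run and B's run
-- agree iff the D_ scan answers false
theorem pvMain (n : ℕ) : ∀ (ls : List String), ls.length ≤ n → pvBoundary ls →
    ∀ (d₁ d₂ : PySem.Dict String (List String)) (ans : Bool),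
    d₁.keys = d₂.keys → d₁.keys.Nodup →
    (∀ k, k ≠ "" → d₁.get? k = d₂.get? k) →
    (ans = false → d₁.get? "" = d₂.get? "") →
    (ans = true → d₁.get? "" ≠ d₂.get? "") →
    (pvDGo false ans ls = false → pvAGo d₁ none ls = pvSectionsGo d₂ ls) ∧
    (pvDGo false ans ls = true →
      (pvAGo d₁ none ls).get? "" ≠ (pvSectionsGo d₂ ls).get? "") := by
  induction n with
  | zero =>
    intro ls hlen hb d₁ d₂ ans hk hnd hne hz1 hz2
    have hls : ls = [] := List.length_eq_zero_iff.mp (Nat.le_zero.mp hlen)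
    subst hls
    exact pvMainNil d₁ d₂ ans hk hnd hne hz1 hz2
  | succ m ih =>
    intro ls hlen hb d₁ d₂ ans hk hnd hne hz1 hz2
    rcases hb with h0 | ⟨h, r, hlr, hh⟩
    · subst h0
      exact pvMainNil d₁ d₂ ans hk hnd hne hz1 hz2
    · subst hlr
      have hh' : (PySem.Str.isIn "###" h || PySem.Str.startswith h "SDB") = true := hh
      have hh2 : pvHd h.toList = true := by rw [pvHd_eq]; exact hh
      have hlen' : (pvSplitSection r).2.length ≤ m :=
        le_trans (pvSplitSection_snd_length_le r) (Nat.le_of_succ_le_succ hlen)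
      have hb' := pvSplit_snd_boundary r
      have hA : pvAGo d₁ none (h :: r) =
          pvAGo (d₁.insert (PySem.Str.strip (PySem.Str.replace h "###" "")) []) (some (PySem.Str.strip (PySem.Str.replace h "###" ""))) r := by
        rw [pvAGo.eq_def]
        simp only [hh', if_true]
      have hB : pvSectionsGo d₂ (h :: r) =
          pvSectionsGo (d₂.insert (PySem.Str.strip (PySem.Str.replace h "###" "")) (pvFiltBody (pvSplitSection r).1))
            (pvSplitSection r).2 := by
        conv_lhs => rw [pvSectionsGo.eq_def]
      by_cases hs : (PySem.Str.strip (PySem.Str.replace h "###" "")) = ""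
      · have hE2 : pvE h.toList = true := by
          unfold pvE
          rw [hh2, (pvNameEmpty_iff h).mpr hs]
          rfl
        have hD : pvDGo false ans (h :: r) = pvDGo true false r := by
          rw [pvDGo, if_pos hE2]
        rw [hA, hB, hD, hs]
        rw [pvAGo_skip_empty r, pvAGo_boundary_cur (pvSplitSection r).2 hb' _ (some "") none]
        rw [pvDGo_sec_true r false,
          pvDGo_boundary_live (pvSplitSection r).2 hb' true false _]
        rw [show (false || !(pvFiltBody (pvSplitSection r).1).isEmpty) =
            !(pvFiltBody (pvSplitSection r).1).isEmpty from by simp]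
        exact ih (pvSplitSection r).2 hlen' hb'
          (d₁.insert "" []) (d₂.insert "" (pvFiltBody (pvSplitSection r).1))
          (!(pvFiltBody (pvSplitSection r).1).isEmpty)
          (pvKeysInsertEq _ _ hk "" _ _)
          (PySem.Dict.nodup_keys_insert _ _ _ hnd)
          (fun k hke => by
            rw [PySem.Dict.get?_insert_of_ne _ _ hke, PySem.Dict.get?_insert_of_ne _ _ hke]
            exact hne k hke)
          (fun hfe => by
            have he : pvFiltBody (pvSplitSection r).1 = [] := by simpa using hfe
            rw [he, PySem.Dict.get?_insert_self, PySem.Dict.get?_insert_self])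
          (fun hft => by
            have hne0 : pvFiltBody (pvSplitSection r).1 ≠ [] := by simpa using hft
            rw [PySem.Dict.get?_insert_self, PySem.Dict.get?_insert_self]
            intro he
            exact hne0 (Option.some.inj he).symm)
      · have hall : ((PySem.Chars.replace h.toList "###".toList []).all
            PySem.Chars.isspace) = false := by
          rw [Bool.eq_false_iff]
          exact fun hc => hs ((pvNameEmpty_iff h).mp hc)
        have hE2 : pvE h.toList = false := by
          unfold pvE
          rw [hall, Bool.and_false]
        have hD : pvDGo false ans (h :: r) = pvDGo false ans r := by
          rw [pvDGo, if_neg (by simp [hE2]), if_pos hh2]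
        rw [hA, hB, hD]
        rw [pvAGo_sec (PySem.Str.strip (PySem.Str.replace h "###" "")) hs r]
        rw [List.nil_append]
        rw [pvAGo_boundary_cur (pvSplitSection r).2 hb' _ (some (PySem.Str.strip (PySem.Str.replace h "###" ""))) none]
        rw [pvDGo_sec_false r ans]
        have hes : ("" : String) ≠ (PySem.Str.strip (PySem.Str.replace h "###" "")) := fun e => hs e.symm
        exact ih (pvSplitSection r).2 hlen' hb'
          (d₁.insert (PySem.Str.strip (PySem.Str.replace h "###" "")) (pvFiltBody (pvSplitSection r).1))
          (d₂.insert (PySem.Str.strip (PySem.Str.replace h "###" "")) (pvFiltBody (pvSplitSection r).1)) ans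
          (pvKeysInsertEq _ _ hk _ _ _)
          (PySem.Dict.nodup_keys_insert _ _ _ hnd)
          (fun k hke => by
            rw [PySem.Dict.get?_insert d₁ _ k _, PySem.Dict.get?_insert d₂ _ k _]
            by_cases hks : k = (PySem.Str.strip (PySem.Str.replace h "###" ""))
            · rw [if_pos hks, if_pos hks]
            · rw [if_neg hks, if_neg hks]
              exact hne k hke)
          (fun h0 => by
            rw [PySem.Dict.get?_insert_of_ne _ _ hes, PySem.Dict.get?_insert_of_ne _ _ hes]
            exact hz1 h0)
          (fun h1 => by
            rw [PySem.Dict.get?_insert_of_ne _ _ hes, PySem.Dict.get?_insert_of_ne _ _ hes]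
            exact hz2 h1)

-- A with cur = none ignores the preamble
theorem pvAGo_skipPre (ls : List String) (d : PySem.Dict String (List String)) :
    pvAGo d none ls = pvAGo d none (pvSkipPre ls) := by
  induction ls with
  | nil => rfl
  | cons l rest ih =>
    by_cases hh : pvIsHeader l = true
    · rw [show pvSkipPre (l :: rest) = l :: rest from by simp [pvSkipPre, hh]]
    · have hh' : ¬ (PySem.Str.isIn "###" l || PySem.Str.startswith l "SDB") = true := hh
      rw [show pvSkipPre (l :: rest) = pvSkipPre rest from by simp [pvSkipPre, hh]]
      rw [pvAGo.eq_def]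
      simp only [hh', Bool.false_eq_true, if_false]
      exact ih

theorem pvDGo_skipPre (ls : List String) (ans : Bool) :
    pvDGo false ans ls = pvDGo false ans (pvSkipPre ls) := by
  induction ls with
  | nil => rfl
  | cons l rest ih =>
    by_cases hh : pvIsHeader l = true
    · rw [show pvSkipPre (l :: rest) = l :: rest from by simp [pvSkipPre, hh]]
    · have hh2 : pvHd l.toList = false := by rw [pvHd_eq]; simpa using hh
      have hE2 : pvE l.toList = false := by simp [pvE, hh2]
      rw [show pvSkipPre (l :: rest) = pvSkipPre rest from by simp [pvSkipPre, hh]]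
      rw [pvDGo, if_neg (by simp [hE2]), if_neg (by simp [hh2]),
        if_neg (by simp)]
      exact ih

-- ===== VERDICT (by name: the statements are the Claim_ definitions above) =====
theorem parse_sosyal_duygusal_py_spec : Claim_unchanged_parse_sosyal_duygusal_py := by
  intro content _ hD
  show parse_sosyal_duygusal_py content = parse_sosyal_duygusal_py_alt content
  unfold parse_sosyal_duygusal_py parse_sosyal_duygusal_py_alt
  have hscan : pvDGo false false
      (pvSkipPre ((PySem.Str.split? content "\n").getD [])) = false := by
    rw [← pvDGo_skipPre]
    rw [Bool.eq_false_iff]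
    exact fun hsc => hD ((pvD_iff content).mpr hsc)
  rw [pvAGo_skipPre]
  have hm := (pvMain (pvSkipPre ((PySem.Str.split? content "\n").getD [])).length
      (pvSkipPre ((PySem.Str.split? content "\n").getD [])) le_rfl
      (pvSkipPre_boundary _) PySem.Dict.empty PySem.Dict.empty false rfl
      (by rw [PySem.Dict.keys_empty]; exact List.nodup_nil)
      (fun _ _ => rfl) (fun _ => rfl) (fun h => absurd h (by simp))).1 hscan
  rw [hm]

theorem parse_sosyal_duygusal_py_changed : Claim_changed_parse_sosyal_duygusal_py := by
  unfold Claim_changed_parse_sosyal_duygusal_py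
  refine ⟨by decide, by decide, by decide, ?_, by decide⟩
  show parse_sosyal_duygusal_py_alt "###\na" = [("", ["a"])]
  unfold parse_sosyal_duygusal_py_alt
  rw [show pvSkipPre ((PySem.Str.split? "###\na" "\n").getD []) = ["###", "a"] from by decide]
  rw [pvSectionsGo.eq_def]
  simp only []
  rw [pvSectionsGo.eq_def]
  decide

theorem parse_sosyal_duygusal_py_tight : Claim_exact_parse_sosyal_duygusal_py := by
  intro content _ hD heq
  unfold parse_sosyal_duygusal_py parse_sosyal_duygusal_py_alt at heq
  rw [pvAGo_skipPre] at heq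
  have hscan : pvDGo false false
      (pvSkipPre ((PySem.Str.split? content "\n").getD [])) = true := by
    rw [← pvDGo_skipPre]; exact (pvD_iff content).mp hD
  have hm := (pvMain (pvSkipPre ((PySem.Str.split? content "\n").getD [])).length
      (pvSkipPre ((PySem.Str.split? content "\n").getD [])) le_rfl
      (pvSkipPre_boundary _) PySem.Dict.empty PySem.Dict.empty false rfl
      (by rw [PySem.Dict.keys_empty]; exact List.nodup_nil)
      (fun _ _ => rfl) (fun _ => rfl) (fun h => absurd h (by simp))).2 hscan
  exact hm (congrArg (fun d => PySem.Dict.get? d "") (PySem.Dict.ext heq))
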